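-- pv_equiv track=rewrite | github.com/askeluv/dai-transitions | utils.py | seconds_spent_with_end_state
-- ===== SOURCE A (Python) =====
-- ABSORBING_STATES = ['wiped', 'bitten', 'shut']
--
-- LAST_TIMESTAMP = 1549495867 # last timestamp observed (i.e. end of the observation period)
--
-- def simplify_state(s):
--     "Collapse 'born' and 'safe again' states into one state: 'safe'."
--     if s in ('born', 'safe again'):
--         return 'safe'
--     else:
--         return s
--
-- def seconds_spent_with_end_state(seq):
--     "Calculate seconds spent in each state for a given sequence."
--     result = []
--     end_state = '<end>'
--     for (i, (s, ts)) in enumerate(seq):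
--         s = simplify_state(s)
--         if i + 1 == len(seq):
--             if s in ABSORBING_STATES:
--                 return result
--             time_spent = LAST_TIMESTAMP - ts
--             next_state = end_state
--         else:
--             next_ts = seq[i + 1][1]
--             next_state = simplify_state(seq[i + 1][0])
--             time_spent = next_ts - ts
--         result.append((s, ts, time_spent, next_state))
--     return result
-- ===== SOURCE B (Python) =====
-- ABSORBING_STATES = ['wiped', 'bitten', 'shut']
--
-- LAST_TIMESTAMP = 1549495867
--
-- def simplify_state(s):
--     "Collapse 'born' and 'safe again' states into one state: 'safe'."
--     if s in ('born', 'safe again'):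
--         return 'safe'
--     else:
--         return s
--
-- def seconds_spent_with_end_state(seq):
--     "Calculate seconds spent in each state for a given sequence."
--     out = []
--     nxt = None  # the already-processed successor (simplified state, timestamp)
--     for s, ts in reversed(seq):
--         s = simplify_state(s)
--         if nxt is None:
--             # overall last element: absorbing states contribute nothing
--             if s not in ABSORBING_STATES:
--                 out.append((s, ts, LAST_TIMESTAMP - ts, '<end>'))
--         else:
--             out.append((s, ts, nxt[1] - ts, nxt[0]))
--         nxt = (s, ts)
--     out.reverse()
--     return out
-- ===== Notes on version B (the rewrite author's own statement) =====
-- stated objective: alternative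
-- what changed: B traverses the sequence backwards in one pass, carrying the already-processed successor (state, timestamp) in an accumulator and reversing the output at the end, instead of A's forward indexed loop that looks ahead at seq[i+1] and branches on the last index.
import Mathlib
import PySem

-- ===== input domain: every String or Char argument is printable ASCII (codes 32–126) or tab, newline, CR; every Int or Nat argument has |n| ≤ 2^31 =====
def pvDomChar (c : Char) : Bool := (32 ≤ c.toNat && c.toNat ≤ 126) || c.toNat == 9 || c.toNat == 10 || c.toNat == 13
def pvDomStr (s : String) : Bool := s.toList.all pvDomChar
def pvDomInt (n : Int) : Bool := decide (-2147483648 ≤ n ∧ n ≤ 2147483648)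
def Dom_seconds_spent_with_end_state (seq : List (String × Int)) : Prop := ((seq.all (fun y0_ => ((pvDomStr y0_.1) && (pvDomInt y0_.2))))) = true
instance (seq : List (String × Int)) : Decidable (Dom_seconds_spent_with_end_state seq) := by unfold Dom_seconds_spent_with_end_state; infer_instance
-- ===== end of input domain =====

-- B traverses the sequence backwards, carrying the already-processed successor in an
-- accumulator, instead of A's forward indexed loop with seq[i+1] lookahead; objective: alternative.

-- ===== PORT A =====
def pvABSORBING : List String := ["wiped", "bitten", "shut"]

def pvLAST : Int := 1549495867

def pvSimplify (s : String) : String :=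
  if s = "born" ∨ s = "safe again" then "safe" else s

-- A's enumerate loop, as an index recursion carrying `result`; the early `return result`
-- on an absorbing last state is the `result` in the `i + 1 = length` branch.
def pvAGo (seq : List (String × Int)) (i : Nat)
    (result : List (String × Int × Int × String)) : List (String × Int × Int × String) :=
  if h : i < seq.length then
    if h1 : i + 1 = seq.length then
      if pvSimplify (seq[i].1) ∈ pvABSORBING then result
      else pvAGo seq (i+1) (result ++ [(pvSimplify (seq[i].1), seq[i].2, pvLAST - seq[i].2, "<end>")])
    else
      pvAGo seq (i+1)
        (result ++ [(pvSimplify (seq[i].1), seq[i].2,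
          (seq[i+1]'(by omega)).2 - seq[i].2, pvSimplify ((seq[i+1]'(by omega)).1))])
  else result
termination_by seq.length - i

def seconds_spent_with_end_state (seq : List (String × Int)) : List (String × Int × Int × String) :=
  pvAGo seq 0 []

-- ===== PORT B =====
-- one step of B's `for s, ts in reversed(seq)` loop over state (nxt, out)
def pvBStep (acc : Option (String × Int) × List (String × Int × Int × String))
    (p : String × Int) : Option (String × Int) × List (String × Int × Int × String) :=
  let s := pvSimplify p.1
  let out :=
    match acc.1 with
    | none => if s ∉ pvABSORBING then acc.2 ++ [(s, p.2, pvLAST - p.2, "<end>")] else acc.2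
    | some nxt => acc.2 ++ [(s, p.2, nxt.2 - p.2, nxt.1)]
  (some (s, p.2), out)

def seconds_spent_with_end_state_alt (seq : List (String × Int)) : List (String × Int × Int × String) :=
  (seq.reverse.foldl pvBStep (none, [])).2.reverse

-- ===== PRECONDITION & SPEC =====
def Spec_seconds_spent_with_end_state (seq : List (String × Int)) (out : List (String × Int × Int × String)) : Prop := out = seconds_spent_with_end_state_alt seq
instance (seq : List (String × Int)) (out : List (String × Int × Int × String)) : Decidable (Spec_seconds_spent_with_end_state seq out) := by unfold Spec_seconds_spent_with_end_state; infer_instance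

-- ===== CLAIM (what is proved, stated in full; the proofs are below) =====
def Claim_equal_seconds_spent_with_end_state : Prop := ∀ (seq : List (String × Int)), Dom_seconds_spent_with_end_state seq → Spec_seconds_spent_with_end_state seq (seconds_spent_with_end_state seq)

-- ===== LEMMAS AND PROOFS =====

-- reference characterisation both ports are reduced to
def pvRef : List (String × Int) → List (String × Int × Int × String)
  | [] => []
  | [(s, ts)] =>
    if pvSimplify s ∈ pvABSORBING then [] else [(pvSimplify s, ts, pvLAST - ts, "<end>")]
  | (s, ts) :: y :: t =>
    (pvSimplify s, ts, y.2 - ts, pvSimplify y.1) :: pvRef (y :: t)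

-- A side: the accumulator factors out
theorem pvAGo_acc : ∀ (n : Nat) (seq : List (String × Int)) (i : Nat) (r : List (String × Int × Int × String)),
    seq.length - i ≤ n → pvAGo seq i r = r ++ pvAGo seq i [] := by
  intro n
  induction n with
  | zero =>
    intro seq i r h
    rw [pvAGo, pvAGo]
    rw [dif_neg (by omega), dif_neg (by omega)]
    simp
  | succ n ih =>
    intro seq i r h
    rw [pvAGo, pvAGo]
    by_cases hi : i < seq.length
    · rw [dif_pos hi, dif_pos hi]
      by_cases h1 : i + 1 = seq.length
      · rw [dif_pos h1, dif_pos h1]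
        by_cases ha : pvSimplify (seq[i].1) ∈ pvABSORBING
        · simp [ha]
        · simp only [if_neg ha]
          rw [ih _ _ _ (by omega), ih _ (i+1) ([] ++ _) (by omega)]
          simp
      · rw [dif_neg h1, dif_neg h1]
        rw [ih _ _ _ (by omega), ih _ (i+1) ([] ++ _) (by omega)]
        simp
    · rw [dif_neg hi, dif_neg hi]
      simp

-- A side: the loop at index i+1 over (x :: xs) is the loop at index i over xs
theorem pvAGo_shift : ∀ (n : Nat) (x : String × Int) (xs : List (String × Int)) (i : Nat)
    (r : List (String × Int × Int × String)),
    xs.length - i ≤ n → pvAGo (x :: xs) (i+1) r = pvAGo xs i r := by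
  intro n
  induction n with
  | zero =>
    intro x xs i r h
    rw [pvAGo, pvAGo]
    rw [dif_neg (by simp; omega), dif_neg (by omega)]
  | succ n ih =>
    intro x xs i r h
    rw [pvAGo, pvAGo]
    by_cases hi : i < xs.length
    · rw [dif_pos (by simp; omega), dif_pos hi]
      by_cases h1 : i + 1 = xs.length
      · rw [dif_pos (by simp; omega), dif_pos h1]
        simp only [List.getElem_cons_succ]
        by_cases ha : pvSimplify (xs[i].1) ∈ pvABSORBING
        · simp [ha]
        · simp only [if_neg ha]
          exact ih _ _ _ _ (by omega)
      · rw [dif_neg (by simp; omega), dif_neg h1]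
        simp only [List.getElem_cons_succ]
        exact ih _ _ _ _ (by omega)
    · rw [dif_neg (by simp; omega), dif_neg (by omega)]

theorem pvA_ref : ∀ (seq : List (String × Int)), pvAGo seq 0 [] = pvRef seq := by
  intro seq
  induction seq with
  | nil => rw [pvAGo]; simp [pvRef]
  | cons x xs ih =>
    obtain ⟨s, ts⟩ := x
    cases xs with
    | nil =>
      rw [pvAGo]
      simp only [List.length_cons, List.length_nil, dif_pos (by simp : 0 < 1),
        List.getElem_cons_zero]
      by_cases ha : pvSimplify s ∈ pvABSORBING
      · simp [ha, pvRef]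
      · simp [ha, pvRef, pvAGo]
    | cons y t =>
      rw [pvAGo]
      rw [dif_pos (by simp), dif_neg (by simp)]
      rw [pvAGo_acc (((s,ts) :: y :: t).length) _ _ _ (by omega)]
      rw [pvAGo_shift ((y :: t).length) _ _ _ _ (by omega)]
      rw [ih]
      simp [pvRef]

-- B side: invariant of the reverse fold — after folding xs.reverse, the carried `nxt` is
-- xs's (simplified) head and the output so far is pvRef xs, built in reverse
theorem pvB_inv : ∀ (xs : List (String × Int)),
    xs.reverse.foldl pvBStep (none, []) =
      (xs.head?.map (fun p => (pvSimplify p.1, p.2)), (pvRef xs).reverse) := by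
  intro xs
  induction xs with
  | nil => simp [pvRef]
  | cons x xs ih =>
    obtain ⟨s, ts⟩ := x
    rw [List.reverse_cons, List.foldl_append, ih]
    cases xs with
    | nil =>
      simp only [List.head?_nil, Option.map_none, List.foldl_cons, List.foldl_nil, pvBStep, pvRef]
      by_cases ha : pvSimplify s ∈ pvABSORBING
      · simp [ha]
      · simp [ha]
    | cons y t =>
      simp [pvBStep, pvRef]

theorem pvB_ref : ∀ (seq : List (String × Int)), seconds_spent_with_end_state_alt seq = pvRef seq := by
  intro seq
  rw [seconds_spent_with_end_state_alt, pvB_inv]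
  simp

-- ===== VERDICT (by name: the statement is the Claim_ definition above) =====
theorem seconds_spent_with_end_state_spec : Claim_equal_seconds_spent_with_end_state := by
  intro seq _
  show seconds_spent_with_end_state seq = _
  rw [seconds_spent_with_end_state, pvA_ref, pvB_ref]
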